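-- pv_equiv track=rewrite | github.com/XingLe0917/ansible-dbpatch | library/test1.py | todo_src_tab_name_list
-- ===== SOURCE A (Python) =====
-- def todo_src_tab_name_list(tablelist):
--     todo_list = []
--     if "add_table" in tablelist:
--         for tab_name in tablelist['add_table'].keys():
--             if tab_name not in todo_list:
--                 todo_list.append(tab_name)
--     if "remove_table" in tablelist:
--         for tab_name in tablelist['remove_table'].keys():
--             if tab_name not in todo_list:
--                 todo_list.append(tab_name)
--     return todo_list
-- ===== SOURCE B (Python) =====
-- def todo_src_tab_name_list(tablelist):
--     combined = []
--     for key in ("add_table", "remove_table"):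
--         combined += list(tablelist.get(key, {}))
--     # selection-style dedup: take the front name, purge all its other
--     # occurrences from the worklist, repeat -- no membership test against
--     # the output and no seen-set accumulator.
--     result = []
--     rest = combined
--     while rest:
--         head = rest[0]
--         result.append(head)
--         rest = [n for n in rest[1:] if n != head]
--     return result
-- ===== Notes on version B (the rewrite author's own statement) =====
-- stated objective: alternative
-- what changed: Replaces A's interleaved append-with-membership-check over a growing output by a two-phase scheme: collect all keys of the present sub-dicts into one flat list, then deduplicate selection-style by repeatedly taking the front name and filtering its remaining occurrences out of the worklist (no membership test against the output at any point).
import Mathlib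
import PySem

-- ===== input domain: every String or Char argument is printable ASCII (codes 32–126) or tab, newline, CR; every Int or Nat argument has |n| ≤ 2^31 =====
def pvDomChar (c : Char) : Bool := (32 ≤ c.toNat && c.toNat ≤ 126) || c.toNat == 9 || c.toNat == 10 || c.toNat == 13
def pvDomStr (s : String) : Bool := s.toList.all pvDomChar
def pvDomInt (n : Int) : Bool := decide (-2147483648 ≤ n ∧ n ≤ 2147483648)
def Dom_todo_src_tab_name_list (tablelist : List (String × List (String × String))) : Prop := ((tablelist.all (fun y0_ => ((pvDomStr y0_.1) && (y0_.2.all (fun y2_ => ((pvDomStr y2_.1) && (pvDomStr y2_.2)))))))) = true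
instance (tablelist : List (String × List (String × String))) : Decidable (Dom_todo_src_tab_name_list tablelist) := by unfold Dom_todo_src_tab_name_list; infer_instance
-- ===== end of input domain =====

-- B collects the present sub-dicts' keys into one flat list, then dedups selection-style (take front name, purge its occurrences from the worklist) — an alternative decomposition with no membership check against the output.


-- ===== PORT A =====
-- literal port of A: interleaved membership-checked appends, first over add_table's keys, then remove_table's
def todo_src_tab_name_list (tablelist : List (String × List (String × String))) : List String :=
  let d := PySem.Dict.mk tablelist
  let todo0 : List String := []
  let todo1 :=
    match d.get? "add_table" with
    | some sub => (PySem.Dict.mk sub).keys.foldl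
        (fun todo tab_name => if todo.contains tab_name then todo else todo ++ [tab_name]) todo0
    | none => todo0
  let todo2 :=
    match d.get? "remove_table" with
    | some sub => (PySem.Dict.mk sub).keys.foldl
        (fun todo tab_name => if todo.contains tab_name then todo else todo ++ [tab_name]) todo1
    | none => todo1
  todo2

-- ===== PORT B =====
-- B's while loop as its structural recursion: take the front name, purge its other occurrences, recurse
def uniqSel : List String → List String
  | [] => []
  | head :: rest => head :: uniqSel (rest.filter (fun n => n != head))
  termination_by l => l.length
  decreasing_by
    simp only [List.length_unattach, List.length_cons]
    exact Nat.lt_succ_of_le (le_trans (List.length_filter_le _ _) (by simp))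

def todo_src_tab_name_list_alt (tablelist : List (String × List (String × String))) : List String :=
  let d := PySem.Dict.mk tablelist
  let combined := ["add_table", "remove_table"].foldl
    (fun acc key => acc ++ (PySem.Dict.mk (d.getD key [])).keys) []
  uniqSel combined

-- ===== PRECONDITION & SPEC =====
def Spec_todo_src_tab_name_list (tablelist : List (String × List (String × String))) (out : List String) : Prop := out = todo_src_tab_name_list_alt tablelist
instance (tablelist : List (String × List (String × String))) (out : List String) : Decidable (Spec_todo_src_tab_name_list tablelist out) := by unfold Spec_todo_src_tab_name_list; infer_instance

-- ===== CLAIM =====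
def Claim_equal_todo_src_tab_name_list : Prop := ∀ (tablelist : List (String × List (String × String))), Dom_todo_src_tab_name_list tablelist → Spec_todo_src_tab_name_list tablelist (todo_src_tab_name_list tablelist)

-- ===== LEMMAS AND PROOFS =====
-- A's loop body IS PySem.Set.add
theorem stepIsSetAdd : (fun (todo : List String) t => if todo.contains t then todo else todo ++ [t]) = PySem.Set.add := by
  funext s x
  simp [PySem.Set.add]

-- invariant: folding Set.add over l starting from acc = acc followed by the selection-dedup of l's fresh elements
theorem foldl_add_eq_uniqSel (l acc : List String) :
    l.foldl PySem.Set.add acc = acc ++ uniqSel (l.filter (fun x => !acc.contains x)) := by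
  induction l generalizing acc with
  | nil => simp [uniqSel]
  | cons hd t ih =>
    rw [List.foldl_cons]
    by_cases hmem : hd ∈ acc
    · have h1 : PySem.Set.add acc hd = acc := by simp [PySem.Set.add, hmem]
      have h2 : (hd :: t).filter (fun x => !acc.contains x) = t.filter (fun x => !acc.contains x) := by
        simp [List.filter_cons, hmem]
      rw [h1, h2, ih]
    · have h1 : PySem.Set.add acc hd = acc ++ [hd] := by simp [PySem.Set.add, hmem]
      have h2 : (hd :: t).filter (fun x => !acc.contains x) = hd :: t.filter (fun x => !acc.contains x) := by
        simp [List.filter_cons, hmem]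
      have hfilter : t.filter (fun x => !(acc ++ [hd]).contains x)
          = (t.filter (fun x => !acc.contains x)).filter (fun n => n != hd) := by
        rw [List.filter_filter]
        apply List.filter_congr
        intro x _
        by_cases hx : x = hd <;> simp [hx, hmem]
      rw [h1, ih, h2, hfilter, uniqSel]
      simp

theorem ofList_eq_uniqSel (l : List String) : PySem.Set.ofList l = uniqSel l := by
  rw [PySem.Set.ofList_eq_foldl, foldl_add_eq_uniqSel]
  simp

-- ===== VERDICT =====
theorem todo_src_tab_name_list_spec : Claim_equal_todo_src_tab_name_list := by
  intro tablelist _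
  unfold Spec_todo_src_tab_name_list todo_src_tab_name_list todo_src_tab_name_list_alt
  simp only [List.foldl, stepIsSetAdd]
  cases hA : (PySem.Dict.mk tablelist).get? "add_table" <;>
    cases hR : (PySem.Dict.mk tablelist).get? "remove_table" <;>
    simp [PySem.Dict.getD, hA, hR, ← ofList_eq_uniqSel, PySem.Set.ofList_eq_foldl,
      List.foldl_append, PySem.Dict.keys]
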